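-- pv_equiv track=rewrite | github.com/AEVO-lab/cnp2cnp | cnpsolver.py | get_nb_flat_intervals
-- ===== SOURCE A (Python) =====
-- def get_nb_flat_intervals(u, v):
--
-- 	count = 0
-- 	prev_w = 0
-- 	for i in range(len(u)):
-- 		delta = u[i] - v[i]
--
-- 		if delta != prev_w:
-- 			count += 1
-- 		prev_w = delta
--
-- 	if prev_w == 0 and count > 0:
-- 		count -= 1
--
-- 	return count
-- ===== SOURCE B (Python) =====
-- def get_nb_flat_intervals(u, v):
--     # Collapse the delta sequence into its list of maximal-run values, then
--     # a closed-form endpoint correction replaces A's virtual-0 start and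
--     # trailing-zero fixup: subtract one for a leading zero run and one for a
--     # trailing zero run, clamped at 0.
--     runs = []
--     for i in range(len(u)):
--         d = u[i] - v[i]
--         if not runs or runs[-1] != d:
--             runs.append(d)
--     if not runs:
--         return 0
--     r = len(runs) - (runs[0] == 0) - (runs[-1] == 0)
--     return max(r, 0)
-- ===== Notes on version B (the rewrite author's own statement) =====
-- stated objective: alternative
-- what changed: Instead of tracking the previous delta and incrementing a change counter with a trailing-zero fixup, B collapses the delta sequence into the list of its maximal-run values and returns a closed-form endpoint formula: number of runs minus a leading zero run minus a trailing zero run, clamped at 0.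
import Mathlib
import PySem

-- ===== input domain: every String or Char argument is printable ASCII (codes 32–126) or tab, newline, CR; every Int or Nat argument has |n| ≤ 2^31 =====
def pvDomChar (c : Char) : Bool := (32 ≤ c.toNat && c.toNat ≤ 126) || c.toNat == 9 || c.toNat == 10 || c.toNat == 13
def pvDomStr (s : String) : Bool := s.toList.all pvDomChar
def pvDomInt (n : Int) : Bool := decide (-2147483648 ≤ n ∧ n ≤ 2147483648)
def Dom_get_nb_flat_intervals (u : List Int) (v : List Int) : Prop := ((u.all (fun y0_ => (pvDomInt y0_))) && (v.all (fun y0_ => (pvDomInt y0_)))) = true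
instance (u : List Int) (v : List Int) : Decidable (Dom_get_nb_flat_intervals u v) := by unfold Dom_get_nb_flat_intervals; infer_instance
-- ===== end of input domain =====

-- B change (one line): collapses the delta sequence into the list of its maximal-run values and
-- returns a closed-form endpoint formula (runs minus leading/trailing zero run, clamped at 0),
-- instead of A's stateful previous-delta change counter with a trailing-zero fixup (alternative).


-- ===== PORT A =====
-- for i in range(len(u)): delta = u[i] - v[i]; if delta != prev_w: count += 1; prev_w = delta
-- u[i]/v[i] ported with pyGetD: exact under Pre_ (every index 0..len(u)-1 is in range for both lists)
def get_nb_flat_intervals (u : List Int) (v : List Int) : Int :=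
  let st := (PySem.List.pyRange 0 u.length 1).foldl
    (fun (st : Int × Int) i =>
      let delta := PySem.List.pyGetD u i 0 - PySem.List.pyGetD v i 0
      (if delta ≠ st.2 then st.1 + 1 else st.1, delta)) (0, 0)
  if st.2 = 0 ∧ st.1 > 0 then st.1 - 1 else st.1

-- ===== PORT B =====
-- runs = []; for i in range(len(u)): d = u[i]-v[i]; if not runs or runs[-1] != d: runs.append(d)
-- if not runs: return 0; r = len(runs) - (runs[0]==0) - (runs[-1]==0); return max(r, 0)
-- runs[-1]/runs[0] ported with pyGetD (-1)/0 (exact: guarded by the emptiness test / early return)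
def get_nb_flat_intervals_alt (u : List Int) (v : List Int) : Int :=
  let runs := (PySem.List.pyRange 0 u.length 1).foldl
    (fun (runs : List Int) i =>
      let d := PySem.List.pyGetD u i 0 - PySem.List.pyGetD v i 0
      if runs = [] ∨ PySem.List.pyGetD runs (-1) 0 ≠ d then runs ++ [d] else runs) []
  if runs = [] then 0
  else
    let r : Int := (runs.length : Int)
      - (if PySem.List.pyGetD runs 0 0 = 0 then 1 else 0)
      - (if PySem.List.pyGetD runs (-1) 0 = 0 then 1 else 0)
    max r 0

-- ===== PRECONDITION & SPEC =====
-- Pre_ excludes exactly the inputs where Python A raises IndexError: v shorter than u (both Pythons index v[i] for i < len(u)).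
def Pre_get_nb_flat_intervals (u : List Int) (v : List Int) : Prop := u.length ≤ v.length
instance (u : List Int) (v : List Int) : Decidable (Pre_get_nb_flat_intervals u v) := by unfold Pre_get_nb_flat_intervals; infer_instance
def pvWitness_get_nb_flat_intervals : List Int × List Int := ([1, 1, 2, 2], [0, 1, 1, 2])

def Spec_get_nb_flat_intervals (u : List Int) (v : List Int) (out : Int) : Prop := out = get_nb_flat_intervals_alt u v
instance (u : List Int) (v : List Int) (out : Int) : Decidable (Spec_get_nb_flat_intervals u v out) := by unfold Spec_get_nb_flat_intervals; infer_instance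

-- ===== CLAIM (what is proved, stated in full; the proofs are below) =====
def Claim_equal_get_nb_flat_intervals : Prop := ∀ (u : List Int) (v : List Int), Dom_get_nb_flat_intervals u v → Pre_get_nb_flat_intervals u v → Spec_get_nb_flat_intervals u v (get_nb_flat_intervals u v)

-- ===== LEMMAS AND PROOFS =====

-- adjacent dedup of a list relative to a previous value: the proof's common currency
def pvDedup (p : Int) : List Int → List Int
  | [] => []
  | d :: t => if d = p then pvDedup p t else d :: pvDedup d t

-- folding a step that first maps the element equals folding the plain step over the mapped list
theorem pvFoldMap {β : Type} (g : β → Int → β) (f : Int → Int) (L : List Int) (init : β) :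
    L.foldl (fun acc i => g acc (f i)) init = (L.map f).foldl g init := by
  induction L generalizing init with
  | nil => rfl
  | cons a t ih => simp only [List.foldl_cons, List.map_cons]; exact ih _

-- A's loop counts exactly the elements of pvDedup, and ends with the last delta as prev
theorem pvLoopA (ds : List Int) : ∀ (c prev : Int),
    ds.foldl (fun (st : Int × Int) d => (if d ≠ st.2 then st.1 + 1 else st.1, d)) (c, prev)
      = (c + ((pvDedup prev ds).length : Int), ds.getLastD prev) := by
  induction ds with
  | nil => intro c prev; simp [pvDedup]
  | cons d t ih =>
    intro c prev
    rw [List.foldl_cons]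
    dsimp only
    by_cases h : d = prev
    · subst h
      have h1 : ((if d ≠ d then c + 1 else c : Int), d) = (c, d) := by simp
      rw [h1, ih, List.getLastD_cons]
      have h2 : pvDedup d (d :: t) = pvDedup d t := by simp [pvDedup]
      rw [h2]
    · have h1 : ((if d ≠ prev then c + 1 else c : Int), d) = (c + 1, d) := by rw [if_pos h]
      rw [h1, ih, List.getLastD_cons]
      have h2 : pvDedup prev (d :: t) = d :: pvDedup d t := by simp [pvDedup, h]
      rw [h2, List.length_cons]
      refine Prod.ext ?_ rfl
      push_cast
      ring

-- B's loop from a nonempty accumulator appends pvDedup of the rest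
theorem pvLoopB (ds : List Int) : ∀ (acc : List Int), acc ≠ [] →
    ds.foldl (fun (acc : List Int) d =>
        if acc = [] ∨ PySem.List.pyGetD acc (-1) 0 ≠ d then acc ++ [d] else acc) acc
      = acc ++ pvDedup (acc.getLastD 0) ds := by
  induction ds with
  | nil => intro acc h; simp [pvDedup]
  | cons d t ih =>
    intro acc h
    have hlast : PySem.List.pyGetD acc (-1) 0 = acc.getLastD 0 := by
      rw [PySem.List.pyGetD_neg_one acc 0 h, List.getLastD_eq_getLast?,
        List.getLast?_eq_some_getLast h]
      rfl
    rw [List.foldl_cons]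
    by_cases hd : acc.getLastD 0 = d
    · rw [if_neg (by rw [hlast, hd]; simp [h]), ih acc h]
      have h2 : pvDedup (acc.getLastD 0) (d :: t) = pvDedup (acc.getLastD 0) t := by
        simp only [pvDedup]
        rw [if_pos hd.symm]
      rw [h2]
    · rw [if_pos (Or.inr (by rw [hlast]; exact hd)), ih (acc ++ [d]) (by simp)]
      have h3 : (acc ++ [d]).getLastD 0 = d := by simp
      rw [h3]
      have hdne : ¬ d = acc.getLastD 0 := fun e => hd e.symm
      have h4 : pvDedup (acc.getLastD 0) (d :: t) = d :: pvDedup d t := by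
        simp only [pvDedup]
        rw [if_neg hdne]
      rw [h4, List.append_assoc]
      rfl

-- the last element of a dedup agrees with the last element of the source
theorem pvDedupLast (ds : List Int) : ∀ (p : Int), (pvDedup p ds).getLastD p = ds.getLastD p := by
  induction ds with
  | nil => intro p; rfl
  | cons d t ih =>
    intro p
    simp only [pvDedup, List.getLastD_cons]
    by_cases h : d = p
    · rw [if_pos h, ih p, h]
    · rw [if_neg h, List.getLastD_cons, ih d]

theorem get_nb_flat_intervals_eq_alt (u v : List Int) :
    get_nb_flat_intervals u v = get_nb_flat_intervals_alt u v := by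
  unfold get_nb_flat_intervals get_nb_flat_intervals_alt
  dsimp only
  rw [pvFoldMap (fun (st : Int × Int) d => (if d ≠ st.2 then st.1 + 1 else st.1, d))
      (fun i => PySem.List.pyGetD u i 0 - PySem.List.pyGetD v i 0),
    pvFoldMap (fun (acc : List Int) d =>
        if acc = [] ∨ PySem.List.pyGetD acc (-1) 0 ≠ d then acc ++ [d] else acc)
      (fun i => PySem.List.pyGetD u i 0 - PySem.List.pyGetD v i 0)]
  set ds := (PySem.List.pyRange 0 u.length 1).map
    (fun i => PySem.List.pyGetD u i 0 - PySem.List.pyGetD v i 0) with hds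
  clear hds
  cases ds with
  | nil => simp
  | cons d t =>
    rw [pvLoopA]
    dsimp only
    have hstep : (List.foldl (fun (acc : List Int) d =>
        if acc = [] ∨ PySem.List.pyGetD acc (-1) 0 ≠ d then acc ++ [d] else acc) [] (d :: t))
        = d :: pvDedup d t := by
      rw [List.foldl_cons, if_pos (Or.inl rfl), List.nil_append, pvLoopB t [d] (by simp)]
      rfl
    rw [hstep]
    have hne : (d :: pvDedup d t) ≠ [] := by simp
    rw [if_neg hne]
    have h0 : PySem.List.pyGetD (d :: pvDedup d t) 0 0 = d :=
      PySem.List.pyGetD_zero_cons d (pvDedup d t) 0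
    have hlastB : PySem.List.pyGetD (d :: pvDedup d t) (-1) 0 = t.getLastD d := by
      rw [PySem.List.pyGetD_neg_one _ 0 hne]
      have h4 : (d :: pvDedup d t).getLast hne = (d :: pvDedup d t).getLastD 0 := by
        rw [List.getLastD_eq_getLast?, List.getLast?_eq_some_getLast hne]
        rfl
      rw [h4, List.getLastD_cons, pvDedupLast]
    rw [h0, hlastB, List.getLastD_cons, List.length_cons]
    have hA : pvDedup (0 : Int) (d :: t) = if d = 0 then pvDedup d t else d :: pvDedup d t := by
      by_cases hdz : d = 0
      · simp [pvDedup, hdz]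
      · simp [pvDedup, hdz]
    rw [hA, apply_ite List.length]
    simp only [List.length_cons]
    push_cast
    split_ifs <;> omega

-- ===== VERDICT (by name: the statement is the Claim_ definition above) =====
theorem get_nb_flat_intervals_spec : Claim_equal_get_nb_flat_intervals := by
  intro u v _ _
  exact get_nb_flat_intervals_eq_alt u v
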